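-- pv_equiv track=rewrite | github.com/MeroCoon/impNet | fix_objectid_serialization.py | add_objectid_import
-- ===== SOURCE A (Python) =====
-- OBJECTID_IMPORT = "from bson import ObjectId"
--
-- def add_objectid_import(content):
--     # Check if ObjectId is already imported
--     if "from bson import ObjectId" not in content:
--         # Add import after the first import statement
--         lines = content.split('\n')
--         for i, line in enumerate(lines):
--             if line.startswith('import ') or line.startswith('from '):
--                 lines.insert(i + 1, OBJECTID_IMPORT)
--                 break
--         return '\n'.join(lines)
--     return content
-- ===== SOURCE B (Python) =====
-- OBJECTID_IMPORT = "from bson import ObjectId"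
--
--
-- def add_objectid_import(content):
--     if OBJECTID_IMPORT in content:
--         return content
--     return _insert(content)
--
--
-- def _insert(s):
--     # s is a suffix of the content starting at a line boundary
--     if s.startswith('import ') or s.startswith('from '):
--         head, sep, tail = s.partition('\n')
--         if not sep:
--             return s + '\n' + OBJECTID_IMPORT
--         return head + '\n' + OBJECTID_IMPORT + '\n' + tail
--     head, sep, tail = s.partition('\n')
--     if not sep:
--         return s
--     return head + '\n' + _insert(tail)
-- ===== Notes on version B (the rewrite author's own statement) =====
-- stated objective: alternative
-- what changed: A splits the content into a list of lines, scans it with enumerate, mutates it with list.insert and rejoins; B never materializes a line list: it recursively partitions the string at the first newline, testing each line head in place and rebuilding the output front-first.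
import Mathlib
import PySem

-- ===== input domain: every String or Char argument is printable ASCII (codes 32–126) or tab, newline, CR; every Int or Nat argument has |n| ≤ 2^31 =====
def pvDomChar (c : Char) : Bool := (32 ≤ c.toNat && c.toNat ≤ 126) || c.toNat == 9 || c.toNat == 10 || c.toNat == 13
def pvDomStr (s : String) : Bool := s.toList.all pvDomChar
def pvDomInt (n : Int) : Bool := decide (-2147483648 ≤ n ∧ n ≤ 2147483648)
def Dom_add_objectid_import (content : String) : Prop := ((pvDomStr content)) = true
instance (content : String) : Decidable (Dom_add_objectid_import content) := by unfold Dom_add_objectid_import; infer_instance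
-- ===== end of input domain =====

-- B replaces A's split-into-lines / scan / list.insert / join with a recursive
-- partition at the first newline that builds the output front-first (objective:
-- alternative — no line list is materialized; equal return value proved below).

-- OBJECTID_IMPORT = "from bson import ObjectId"
def pvImp : List Char := "from bson import ObjectId".toList

-- ===== PORT A =====
-- the for-loop with break: insert OBJECTID_IMPORT after the first import line
def pvInsertAfterFirst : List (List Char) → List (List Char)
  | [] => []
  | l :: rest =>
      if PySem.Chars.startswith l "import ".toList || PySem.Chars.startswith l "from ".toList then
        l :: pvImp :: rest
      else
        l :: pvInsertAfterFirst rest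

def add_objectid_import (content : String) : String :=
  if PySem.Str.isIn "from bson import ObjectId" content = false then
    String.ofList
      (PySem.Chars.join "\n".toList
        (pvInsertAfterFirst (PySem.Chars.splitOn content.toList "\n".toList)))
  else content

-- ===== PORT B =====
-- hand port of s.partition('\n') (exact for this single-character separator):
-- returns (head, found-separator?, tail)
def pvPartitionNL : List Char → List Char × Bool × List Char
  | [] => ([], false, [])
  | c :: rest =>
      if c = '\n' then ([], true, rest)
      else
        let p := pvPartitionNL rest
        (c :: p.1, p.2.1, p.2.2)

-- the tail of a successful partition is strictly shorter (termination of pvInsertAlt)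
theorem pvPartition_tail_lt :
    ∀ (s : List Char), (pvPartitionNL s).2.1 = true → (pvPartitionNL s).2.2.length < s.length := by
  intro s h
  induction s with
  | nil => simp [pvPartitionNL] at h
  | cons c rest ih =>
      by_cases hc : c = '\n'
      · simp [pvPartitionNL, hc]
      · simp only [pvPartitionNL, if_neg hc] at h ⊢
        exact Nat.lt_succ_of_lt (ih h)

def pvInsertAlt (s : List Char) : List Char :=
  if PySem.Chars.startswith s "import ".toList || PySem.Chars.startswith s "from ".toList then
    let p := pvPartitionNL s
    if p.2.1 then p.1 ++ '\n' :: (pvImp ++ '\n' :: p.2.2)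
    else s ++ '\n' :: pvImp
  else
    let p := pvPartitionNL s
    if h : p.2.1 = true then p.1 ++ '\n' :: pvInsertAlt p.2.2
    else s
termination_by s.length
decreasing_by exact pvPartition_tail_lt s h

def add_objectid_import_alt (content : String) : String :=
  if PySem.Str.isIn "from bson import ObjectId" content then content
  else String.ofList (pvInsertAlt content.toList)

-- ===== PRECONDITION & SPEC =====
def Spec_add_objectid_import (content : String) (out : String) : Prop := out = add_objectid_import_alt content
instance (content : String) (out : String) : Decidable (Spec_add_objectid_import content out) := by unfold Spec_add_objectid_import; infer_instance

-- ===== CLAIM (what is proved, stated in full; the proofs are below) =====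
def Claim_equal_add_objectid_import : Prop := ∀ (content : String), Dom_add_objectid_import content → Spec_add_objectid_import content (add_objectid_import content)

-- ===== LEMMAS AND PROOFS =====

-- proof-side characterization of split('\n'): structural lines
def pvLines : List Char → List (List Char)
  | [] => [[]]
  | c :: rest =>
      if c = '\n' then [] :: pvLines rest
      else
        match pvLines rest with
        | [] => [[c]]
        | l :: ls => (c :: l) :: ls

theorem pvLines_ne_nil (s : List Char) : pvLines s ≠ [] := by
  induction s with
  | nil => simp [pvLines]
  | cons c rest ih =>
      by_cases hc : c = '\n'
      · simp [pvLines, hc]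
      · simp only [pvLines, if_neg hc]
        cases pvLines rest <;> simp

theorem pv_go_spec (fuel : Nat) :
    ∀ (l cur : List Char) (accs : List (List Char)), l.length < fuel →
      PySem.Chars.splitOn.go ['\n'] fuel l cur accs =
        accs.reverse ++ (pvLines l).modifyHead (fun x => cur.reverse ++ x) := by
  induction fuel with
  | zero => intro l cur accs h; omega
  | succ f ih =>
      intro l cur accs h
      cases l with
      | nil => simp [PySem.Chars.splitOn.go, pvLines]
      | cons c rest =>
          by_cases hc : c = '\n'
          · subst hc
            have hpre : List.isPrefixOf ['\n'] ('\n' :: rest) = true := by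
              simp [List.isPrefixOf]
            simp only [PySem.Chars.splitOn.go, hpre, if_pos]
            rw [show List.drop ['\n'].length ('\n' :: rest) = rest from rfl]
            rw [ih rest [] ((cur.reverse) :: accs) (by simpa using Nat.lt_of_succ_lt_succ h)]
            simp [pvLines]
            cases pvLines rest <;> simp
          · have hpre : List.isPrefixOf ['\n'] (c :: rest) = false := by
              simp [List.isPrefixOf]
              exact fun hh => (hc hh.symm).elim
            simp only [PySem.Chars.splitOn.go, hpre, Bool.false_eq_true, if_false]
            rw [ih rest (c :: cur) accs (by simpa using Nat.lt_of_succ_lt_succ h)]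
            simp only [pvLines, if_neg hc]
            rcases hl : pvLines rest with _ | ⟨l0, ls⟩
            · exact absurd hl (pvLines_ne_nil rest)
            · simp

theorem pv_splitOn_eq_lines (s : List Char) :
    PySem.Chars.splitOn s ['\n'] = pvLines s := by
  have := pv_go_spec (s.length + 1) s [] [] (by omega)
  simp only [PySem.Chars.splitOn, this, List.reverse_nil, List.nil_append]
  cases hl : pvLines s with
  | nil => exact absurd hl (pvLines_ne_nil s)
  | cons l ls => simp

-- pvPartitionNL against pvLines
theorem pv_partition_false (s : List Char) (h : (pvPartitionNL s).2.1 = false) :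
    pvLines s = [s] := by
  induction s with
  | nil => simp [pvLines]
  | cons c rest ih =>
      by_cases hc : c = '\n'
      · simp [pvPartitionNL, hc] at h
      · simp only [pvPartitionNL, if_neg hc] at h
        simp only [pvLines, if_neg hc, ih h]

theorem pv_partition_true (s : List Char) (h : (pvPartitionNL s).2.1 = true) :
    pvLines s = (pvPartitionNL s).1 :: pvLines (pvPartitionNL s).2.2 := by
  induction s with
  | nil => simp [pvPartitionNL] at h
  | cons c rest ih =>
      by_cases hc : c = '\n'
      · simp [pvLines, pvPartitionNL, hc]
      · simp only [pvPartitionNL, if_neg hc] at h ⊢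
        simp only [pvLines, if_neg hc, ih h]

-- join over a cons with a nonempty rest
theorem pv_join_cons (l : List Char) (L : List (List Char)) (hL : L ≠ []) :
    PySem.Chars.join ['\n'] (l :: L) = l ++ '\n' :: PySem.Chars.join ['\n'] L := by
  rcases L with _ | ⟨l0, ls⟩
  · exact absurd rfl hL
  · simp [PySem.Chars.join, List.intercalate]

theorem pv_join_single (l : List Char) : PySem.Chars.join ['\n'] [l] = l := by
  simp [PySem.Chars.join, List.intercalate]

-- join over pvLines reconstructs the string
theorem pv_join_lines (s : List Char) :
    PySem.Chars.join ['\n'] (pvLines s) = s := by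
  induction s with
  | nil => simp [pvLines, PySem.Chars.join, List.intercalate]
  | cons c rest ih =>
      by_cases hc : c = '\n'
      · subst hc
        rw [show pvLines ('\n' :: rest) = [] :: pvLines rest from by simp [pvLines]]
        rw [pv_join_cons _ _ (pvLines_ne_nil rest), ih]
        rfl
      · simp only [pvLines, if_neg hc]
        rcases hl : pvLines rest with _ | ⟨l0, ls⟩
        · exact absurd hl (pvLines_ne_nil rest)
        · rw [hl] at ih
          rcases ls with _ | ⟨l1, ls'⟩
          · rw [pv_join_single] at ih ⊢
            rw [← ih]
          · rw [pv_join_cons _ _ (by simp)] at ih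
            rw [pv_join_cons _ _ (by simp), ← ih]
            rfl

theorem pvInsertAfterFirst_ne_nil (L : List (List Char)) (hL : L ≠ []) :
    pvInsertAfterFirst L ≠ [] := by
  rcases L with _ | ⟨l, rest⟩
  · exact absurd rfl hL
  · simp only [pvInsertAfterFirst]
    split <;> simp

-- a newline-free prefix of s is exactly a prefix of the first line
theorem pv_prefix_head (p : List Char) (hp : '\n' ∉ p) :
    ∀ (s : List Char), (pvPartitionNL s).2.1 = true →
      (List.isPrefixOf p (pvPartitionNL s).1 = List.isPrefixOf p s) := by
  induction p with
  | nil => intro s _; simp [List.isPrefixOf]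
  | cons q p' ihp =>
      intro s hs
      cases s with
      | nil => simp [pvPartitionNL] at hs
      | cons c rest =>
          by_cases hc : c = '\n'
          · subst hc
            simp only [pvPartitionNL, reduceIte]
            have hqne : q ≠ '\n' := fun hh => hp (by simp [hh])
            have hq : (q == '\n') = false := by simp [hqne]
            simp [List.isPrefixOf, hq]
          · simp only [pvPartitionNL, if_neg hc] at hs ⊢
            have hp' : '\n' ∉ p' := fun hh => hp (List.mem_cons_of_mem _ hh)
            simp only [List.isPrefixOf]
            rw [ihp hp' rest hs]

theorem pv_startswith_head (s : List Char) (h : (pvPartitionNL s).2.1 = true)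
    (p : List Char) (hp : '\n' ∉ p) :
    PySem.Chars.startswith (pvPartitionNL s).1 p = PySem.Chars.startswith s p := by
  simp only [PySem.Chars.startswith]
  exact pv_prefix_head p hp s h

theorem pv_nl_not_mem_import : '\n' ∉ "import ".toList := by decide
theorem pv_nl_not_mem_from : '\n' ∉ "from ".toList := by decide

-- the core equivalence of the two insertion strategies
theorem pv_main (n : Nat) : ∀ (s : List Char), s.length ≤ n →
    PySem.Chars.join ['\n'] (pvInsertAfterFirst (pvLines s)) = pvInsertAlt s := by
  induction n with
  | zero =>
      intro s hs
      have : s = [] := by cases s <;> simp_all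
      subst this
      simp [pvLines, pvInsertAfterFirst, pvInsertAlt, pvPartitionNL, PySem.Chars.startswith,
        PySem.Chars.join, List.intercalate]
  | succ n ih =>
      intro s hs
      by_cases hf : (pvPartitionNL s).2.1 = true
      · -- s has a newline: the first line is the head of the partition
        have hlines := pv_partition_true s hf
        have hswi := pv_startswith_head s hf _ pv_nl_not_mem_import
        have hswf := pv_startswith_head s hf _ pv_nl_not_mem_from
        rw [hlines, pvInsertAlt]
        by_cases hcond : (PySem.Chars.startswith s "import ".toList
            || PySem.Chars.startswith s "from ".toList) = true
        · have hcond' : (PySem.Chars.startswith (pvPartitionNL s).1 "import ".toList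
              || PySem.Chars.startswith (pvPartitionNL s).1 "from ".toList) = true := by
            rw [hswi, hswf]; exact hcond
          rw [if_pos hcond, if_pos hf]
          simp only [pvInsertAfterFirst, if_pos hcond']
          rw [pv_join_cons _ _ (by simp), pv_join_cons _ _ (pvLines_ne_nil _), pv_join_lines]
        · have hcond' : ¬ (PySem.Chars.startswith (pvPartitionNL s).1 "import ".toList
              || PySem.Chars.startswith (pvPartitionNL s).1 "from ".toList) = true := by
            rw [hswi, hswf]; exact hcond
          rw [if_neg hcond, dif_pos hf]
          simp only [pvInsertAfterFirst, if_neg hcond']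
          rw [pv_join_cons _ _ (pvInsertAfterFirst_ne_nil _ (pvLines_ne_nil _))]
          rw [ih (pvPartitionNL s).2.2 (by have := pvPartition_tail_lt s hf; omega)]
      · -- no newline: s is its single line
        have hf' : (pvPartitionNL s).2.1 = false := by simpa using hf
        have hlines := pv_partition_false s hf'
        rw [hlines, pvInsertAlt]
        by_cases hcond : (PySem.Chars.startswith s "import ".toList
            || PySem.Chars.startswith s "from ".toList) = true
        · rw [if_pos hcond, if_neg hf]
          simp only [pvInsertAfterFirst, if_pos hcond]
          rw [pv_join_cons _ _ (by simp), pv_join_single]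
        · rw [if_neg hcond, dif_neg hf]
          simp only [pvInsertAfterFirst, if_neg hcond]
          rw [pv_join_single]

-- ===== VERDICT (by name: the statement is the Claim_ definition above) =====
theorem add_objectid_import_spec : Claim_equal_add_objectid_import := by
  intro content _
  unfold Spec_add_objectid_import add_objectid_import add_objectid_import_alt
  cases hin : PySem.Str.isIn "from bson import ObjectId" content
  · simp only [Bool.false_eq_true, if_false, if_pos]
    congr 1
    have hnl : ("\n".toList : List Char) = ['\n'] := by decide
    rw [hnl, pv_splitOn_eq_lines, pv_main content.toList.length content.toList le_rfl]
  · simp
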